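-- pv_equiv track=rewrite | github.com/cyblack/Algorithm | Concept/1.py | build_houses_top_left_chunks
-- ===== SOURCE A (Python) =====
-- from typing import List, Tuple
--
-- Point = Tuple[int, int]
--
-- BBox = Tuple[int, int, int, int]  # (xmin, ymin, xmax, ymax)
--
-- def bbox_of(points: List[Point]) -> BBox:
--     xs = [p[0] for p in points]
--     ys = [p[1] for p in points]
--     return (min(xs), min(ys), max(xs), max(ys))
--
-- def build_houses_top_left_chunks(points: List[Point]) -> Tuple[List[List[Point]], List[BBox]]:
--     """
--     1) 좌상단 가까운 순으로 정렬 (y 오름차순, x 오름차순)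
--     2) 앞에서부터 4개씩 그룹
--     3) 남는 자투리(1~3)는 마지막 그룹에 추가
--     4) 각 그룹 bbox 생성
--     """
--     pts = sorted(points, key=lambda p: (p[1], p[0]))  # top-left priority
--
--     groups: List[List[Point]] = []
--     i = 0
--     while i + 4 <= len(pts):
--         groups.append(pts[i:i+4])
--         i += 4
--
--     leftover = pts[i:]  # 0~3개
--     if leftover:
--         if not groups:
--             groups.append(leftover)
--         else:
--             groups[-1].extend(leftover)
--
--     bboxes = [bbox_of(g) for g in groups]
--     return groups, bboxes
-- ===== SOURCE B (Python) =====
-- from typing import List, Tuple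
--
-- Point = Tuple[int, int]
-- BBox = Tuple[int, int, int, int]
--
-- def _chunk(l: List[Point]) -> List[List[Point]]:
--     # recursive chunking: fewer than 8 points left -> one (last) group,
--     # so the 1-3 leftover points fold into the final group with no patch-up pass
--     if not l:
--         return []
--     if len(l) < 8:
--         return [l]
--     return [l[:4]] + _chunk(l[4:])
--
-- def build_houses_top_left_chunks(points: List[Point]) -> Tuple[List[List[Point]], List[BBox]]:
--     pts = sorted(points, key=lambda p: (p[1], p[0]))
--     groups = _chunk(pts)
--     bboxes = []
--     for g in groups:
--         x0, y0 = g[0]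
--         xmin, ymin, xmax, ymax = x0, y0, x0, y0
--         for (x, y) in g[1:]:
--             if x < xmin: xmin = x
--             if x > xmax: xmax = x
--             if y < ymin: ymin = y
--             if y > ymax: ymax = y
--         bboxes.append((xmin, ymin, xmax, ymax))
--     return groups, bboxes
-- ===== Notes on version B (the rewrite author's own statement) =====
-- stated objective: alternative
-- what changed: Replaces the index-based while loop that slices full 4-chunks plus a separate leftover-extend patch with a direct structural recursion (fewer than 8 points remaining form the final group, so leftovers merge naturally), and computes each bbox in one running min/max pass instead of four list comprehensions with min/max.
import Mathlib
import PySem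

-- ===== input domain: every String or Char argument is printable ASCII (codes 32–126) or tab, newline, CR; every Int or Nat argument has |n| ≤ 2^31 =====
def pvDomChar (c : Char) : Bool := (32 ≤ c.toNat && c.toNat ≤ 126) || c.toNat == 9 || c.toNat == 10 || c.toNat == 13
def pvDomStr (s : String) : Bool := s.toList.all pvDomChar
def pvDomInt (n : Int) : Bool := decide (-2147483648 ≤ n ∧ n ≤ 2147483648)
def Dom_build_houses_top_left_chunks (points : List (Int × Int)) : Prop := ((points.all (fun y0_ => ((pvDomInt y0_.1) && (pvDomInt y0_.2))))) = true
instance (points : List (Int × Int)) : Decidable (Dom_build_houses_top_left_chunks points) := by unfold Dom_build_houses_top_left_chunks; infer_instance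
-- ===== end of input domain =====

-- B replaces A's index-based while-loop chunking + separate leftover patch by a structural
-- recursion on the sorted list, and computes each bbox in one running min/max pass (objective: alternative).

-- ===== PORT A =====
-- bbox_of: min/max of the x and y projections; the .getD 0 default is never reached,
-- A only calls bbox_of on nonempty groups (Python min/max would raise on []).
def pvBboxOf (points : List (Int × Int)) : Int × Int × Int × Int :=
  let xs := points.map (fun p => p.1)
  let ys := points.map (fun p => p.2)
  ((PySem.List.min? xs (fun x => x)).getD 0, (PySem.List.min? ys (fun x => x)).getD 0,
   (PySem.List.max? xs (fun x => x)).getD 0, (PySem.List.max? ys (fun x => x)).getD 0)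

-- groups[-1].extend(leftover), ported by structural recursion on the list of groups;
-- exact for A: A only reaches it with a nonempty groups list
def pvExtendLast : List (List (Int × Int)) → List (Int × Int) → List (List (Int × Int))
  | [], _ => []
  | [g], lo => [g ++ lo]
  | g :: gs, lo => g :: pvExtendLast gs lo

-- the 'while i + 4 <= len(pts)' loop, state = (groups, i)
def pvLoopA (pts : List (Int × Int)) (groups : List (List (Int × Int))) (i : Nat) :
    List (List (Int × Int)) × Nat :=
  if i + 4 ≤ pts.length then
    pvLoopA pts (groups ++ [PySem.List.slice pts (some (i : Int)) (some ((i : Int) + 4))]) (i + 4)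
  else (groups, i)
termination_by pts.length - i
decreasing_by omega

def build_houses_top_left_chunks (points : List (Int × Int)) :
    (List (List (Int × Int))) × (List (Int × Int × Int × Int)) :=
  let pts := PySem.List.sorted2 points (fun p => p.2) (fun p => p.1)
  let st := pvLoopA pts [] 0
  let leftover := PySem.List.slice pts (some (st.2 : Int)) none
  let groups :=
    if leftover ≠ [] then
      if st.1 = [] then st.1 ++ [leftover]
      else pvExtendLast st.1 leftover
    else st.1
  (groups, groups.map pvBboxOf)

-- ===== PORT B =====
def pvChunk (l : List (Int × Int)) : List (List (Int × Int)) :=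
  if l = [] then []
  else if l.length < 8 then [l]
  else PySem.List.slice l none (some 4) :: pvChunk (PySem.List.slice l (some 4) none)
termination_by l.length
decreasing_by
  have hs : PySem.List.slice l (some 4) none = l.drop 4 := by
    simpa using PySem.List.slice_from l (by norm_num : (0:Int) ≤ 4)
  rw [hs]
  simp only [List.length_drop]
  omega

-- running min/max pass; the [] case is unreachable (chunks are nonempty)
def pvBboxB (g : List (Int × Int)) : Int × Int × Int × Int :=
  match g with
  | [] => (0, 0, 0, 0)
  | (x0, y0) :: rest =>
    rest.foldl (fun s p =>
      let xmin := if p.1 < s.1 then p.1 else s.1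
      let xmax := if p.1 > s.2.2.1 then p.1 else s.2.2.1
      let ymin := if p.2 < s.2.1 then p.2 else s.2.1
      let ymax := if p.2 > s.2.2.2 then p.2 else s.2.2.2
      (xmin, ymin, xmax, ymax)) (x0, y0, x0, y0)

def build_houses_top_left_chunks_alt (points : List (Int × Int)) :
    (List (List (Int × Int))) × (List (Int × Int × Int × Int)) :=
  let pts := PySem.List.sorted2 points (fun p => p.2) (fun p => p.1)
  let groups := pvChunk pts
  (groups, groups.map pvBboxB)

-- ===== PRECONDITION & SPEC =====
def Spec_build_houses_top_left_chunks (points : List (Int × Int)) (out : (List (List (Int × Int))) × (List (Int × Int × Int × Int))) : Prop := out = build_houses_top_left_chunks_alt points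
instance (points : List (Int × Int)) (out : (List (List (Int × Int))) × (List (Int × Int × Int × Int))) : Decidable (Spec_build_houses_top_left_chunks points out) := by unfold Spec_build_houses_top_left_chunks; infer_instance

-- ===== CLAIM (what is proved, stated in full; the proofs are below) =====
def Claim_equal_build_houses_top_left_chunks : Prop := ∀ (points : List (Int × Int)), Dom_build_houses_top_left_chunks points → Spec_build_houses_top_left_chunks points (build_houses_top_left_chunks points)

-- ===== LEMMAS AND PROOFS =====

-- reference shape of A's loop result: the full 4-chunks of a list, and the remainder
def pvFull (l : List (Int × Int)) : List (List (Int × Int)) :=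
  if 4 ≤ l.length then l.take 4 :: pvFull (l.drop 4) else []
termination_by l.length
decreasing_by simp only [List.length_drop]; omega

def pvRest (l : List (Int × Int)) : List (Int × Int) :=
  if 4 ≤ l.length then pvRest (l.drop 4) else l
termination_by l.length
decreasing_by simp only [List.length_drop]; omega

lemma pvLoopA_char (pts : List (Int × Int)) (i : Nat) (groups : List (List (Int × Int))) :
    (pvLoopA pts groups i).1 = groups ++ pvFull (pts.drop i) ∧
    pts.drop (pvLoopA pts groups i).2 = pvRest (pts.drop i) := by
  by_cases h : i + 4 ≤ pts.length
  · have hslice : PySem.List.slice pts (some (i : Int)) (some ((i : Int) + 4))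
        = (pts.drop i).take 4 := by
      simpa using PySem.List.slice_natCast_add pts i 4
    have hdd : (pts.drop i).drop 4 = pts.drop (i + 4) := by
      simp [List.drop_drop]
    have h4 : 4 ≤ (pts.drop i).length := by simp only [List.length_drop]; omega
    rw [pvLoopA.eq_def, if_pos h]
    have ih := pvLoopA_char pts (i + 4)
      (groups ++ [PySem.List.slice pts (some (i : Int)) (some ((i : Int) + 4))])
    constructor
    · rw [ih.1, hslice, pvFull.eq_def (pts.drop i), if_pos h4, hdd]
      simp
    · rw [ih.2, pvRest.eq_def (pts.drop i), if_pos h4, hdd]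
  · rw [pvLoopA.eq_def, if_neg h]
    have h4 : ¬ 4 ≤ (pts.drop i).length := by simp only [List.length_drop]; omega
    rw [pvFull.eq_def (pts.drop i), if_neg h4, pvRest.eq_def (pts.drop i), if_neg h4]
    simp
termination_by pts.length - i
decreasing_by omega

lemma pvExtendLast_cons (a : List (Int × Int)) (g' : List (List (Int × Int)))
    (r : List (Int × Int)) (h : g' ≠ []) :
    pvExtendLast (a :: g') r = a :: pvExtendLast g' r := by
  cases g' with
  | nil => exact absurd rfl h
  | cons b t => rfl

lemma pvPatch_eq_chunk (l : List (Int × Int)) :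
    (if pvRest l ≠ [] then
      if pvFull l = [] then pvFull l ++ [pvRest l]
      else pvExtendLast (pvFull l) (pvRest l)
     else pvFull l) = pvChunk l := by
  by_cases h8 : 8 ≤ l.length
  · have hne : l ≠ [] := by intro e; subst e; simp at h8
    have h4 : 4 ≤ l.length := by omega
    have h4' : 4 ≤ (l.drop 4).length := by simp only [List.length_drop]; omega
    have hfne : pvFull (l.drop 4) ≠ [] := by
      rw [pvFull.eq_def, if_pos h4']; exact List.cons_ne_nil _ _
    have hs1 : PySem.List.slice l none (some 4) = l.take 4 := by
      simpa using PySem.List.slice_to l (by norm_num : (0:Int) ≤ 4)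
    have hs2 : PySem.List.slice l (some 4) none = l.drop 4 := by
      simpa using PySem.List.slice_from l (by norm_num : (0:Int) ≤ 4)
    have ih := pvPatch_eq_chunk (l.drop 4)
    rw [pvFull.eq_def l, if_pos h4, pvRest.eq_def l, if_pos h4,
      pvChunk.eq_def l, if_neg hne, if_neg (by omega : ¬ l.length < 8), hs1, hs2]
    by_cases hr : pvRest (l.drop 4) = []
    · have hrr : ¬ (pvRest (l.drop 4) ≠ []) := by simp [hr]
      rw [if_neg hrr] at ih ⊢
      rw [ih]
    · rw [if_pos hr, if_neg hfne] at ih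
      rw [if_pos hr, if_neg (List.cons_ne_nil _ _), pvExtendLast_cons _ _ _ hfne, ih]
  · by_cases h4 : 4 ≤ l.length
    · have hne : l ≠ [] := by intro e; subst e; simp at h4
      have hf0 : pvFull (l.drop 4) = [] := by
        rw [pvFull.eq_def, if_neg]; simp only [List.length_drop]; omega
      have hr0 : pvRest (l.drop 4) = l.drop 4 := by
        rw [pvRest.eq_def, if_neg]; simp only [List.length_drop]; omega
      have h8' : l.length < 8 := by omega
      rw [pvFull.eq_def l, pvRest.eq_def l, pvChunk.eq_def l]
      by_cases hd : l.drop 4 = []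
      · have hlen : l.length ≤ 4 := by
          have := List.drop_eq_nil_iff.mp hd
          omega
        have ht : l.take 4 = l := List.take_of_length_le hlen
        have hfnil : pvFull ([] : List (Int × Int)) = [] := by
          rw [pvFull.eq_def]; simp
        have hrnil : pvRest ([] : List (Int × Int)) = [] := by
          rw [pvRest.eq_def]; simp
        simp [h4, hd, ht, hne, h8', hfnil, hrnil]
      · simp [h4, hf0, hr0, hd, hne, h8', pvExtendLast, List.take_append_drop]
    · have h8' : l.length < 8 := by omega
      rw [pvFull.eq_def l, pvRest.eq_def l, pvChunk.eq_def l]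
      by_cases hl : l = []
      · subst hl
        simp
      · simp [h4, hl, h8']
termination_by l.length
decreasing_by simp only [List.length_drop]; omega

lemma pvFoldStep (rest : List (Int × Int)) (a b c d : Int) :
    rest.foldl (fun s p =>
      let xmin := if p.1 < s.1 then p.1 else s.1
      let xmax := if p.1 > s.2.2.1 then p.1 else s.2.2.1
      let ymin := if p.2 < s.2.1 then p.2 else s.2.1
      let ymax := if p.2 > s.2.2.2 then p.2 else s.2.2.2
      (xmin, ymin, xmax, ymax)) (a, b, c, d)
    = ((rest.map (fun p => p.1)).foldl min a, (rest.map (fun p => p.2)).foldl min b,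
       (rest.map (fun p => p.1)).foldl max c, (rest.map (fun p => p.2)).foldl max d) := by
  induction rest generalizing a b c d with
  | nil => rfl
  | cons p t ih =>
    simp only [List.foldl_cons, List.map_cons]
    rw [ih]
    have e1 : (if p.1 < a then p.1 else a) = min a p.1 := by split_ifs <;> omega
    have e2 : (if p.2 < b then p.2 else b) = min b p.2 := by split_ifs <;> omega
    have e3 : (if p.1 > c then p.1 else c) = max c p.1 := by split_ifs <;> omega
    have e4 : (if p.2 > d then p.2 else d) = max d p.2 := by split_ifs <;> omega
    rw [e1, e2, e3, e4]

lemma pvBbox_eq (g : List (Int × Int)) : pvBboxOf g = pvBboxB g := by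
  cases g with
  | nil => rfl
  | cons p rest =>
    obtain ⟨x0, y0⟩ := p
    show pvBboxOf ((x0, y0) :: rest) = _
    rw [pvBboxB, pvFoldStep]
    simp only [pvBboxOf, List.map_cons, PySem.List.min?_id_cons, PySem.List.max?_id_cons,
      Option.getD_some]

-- ===== VERDICT (by name: the statement is the Claim_ definition above) =====
theorem build_houses_top_left_chunks_spec : Claim_equal_build_houses_top_left_chunks := by
  intro points _
  unfold Spec_build_houses_top_left_chunks
  simp only [build_houses_top_left_chunks, build_houses_top_left_chunks_alt]
  generalize PySem.List.sorted2 points (fun p => p.2) (fun p => p.1) = pts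
  have hc := pvLoopA_char pts 0 []
  simp only [List.drop_zero, List.nil_append] at hc
  rw [PySem.List.slice_from_natCast]
  simp only [hc.1, hc.2]
  rw [pvPatch_eq_chunk]
  have hb : pvBboxOf = pvBboxB := funext pvBbox_eq
  rw [hb]
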